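-- pv_equiv track=rewrite | github.com/bisuwuss-netizen/paper-research-hub | backend/app/services/pdf_extract.py | _guess_metric_columns
-- ===== SOURCE A (Python) =====
-- from typing import Optional, List, Dict, Any, Tuple
--
-- def _guess_metric_columns(header: List[str]) -> Dict[str, int]:
--     columns: Dict[str, int] = {}
--     for idx, raw in enumerate(header):
--         token = raw.lower()
--         if "dataset" in token or "corpus" in token or token in {"data", "bench"}:
--             columns.setdefault("dataset_name", idx)
--         if token in {"p", "prec", "precision"} or "precision" in token:
--             columns.setdefault("precision", idx)
--         if token in {"r", "recall"} or "recall" in token: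
--             columns.setdefault("recall", idx)
--         if token in {"f1", "f1-score", "f"} or "f1" in token:
--             columns.setdefault("f1", idx)
--         if "trigger" in token and "f1" in token:
--             columns.setdefault("trigger_f1", idx)
--         if "argument" in token and "f1" in token:
--             columns.setdefault("argument_f1", idx)
--     return columns
-- ===== SOURCE B (Python) =====
-- _METRIC_PREDICATES = [
--     ("dataset_name", lambda t: "dataset" in t or "corpus" in t or t in ("data", "bench")),
--     ("precision",    lambda t: t in ("p", "prec") or "precision" in t),
--     ("recall",       lambda t: t == "r" or "recall" in t),
--     ("f1",           lambda t: t == "f" or "f1" in t),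
--     ("trigger_f1",   lambda t: "trigger" in t and "f1" in t),
--     ("argument_f1",  lambda t: "argument" in t and "f1" in t),
-- ]
--
--
-- def _guess_metric_columns(header):
--     tokens = [s.lower() for s in header]
--     matches = []
--     for key, pred in _METRIC_PREDICATES:
--         idx = next((i for i, t in enumerate(tokens) if pred(t)), None)
--         if idx is not None:
--             matches.append((key, idx))
--     return dict(sorted(matches, key=lambda kv: kv[1]))
-- ===== Notes on version B (the rewrite author's own statement) =====
-- stated objective: alternative
-- what changed: Replaced A's single left-to-right pass that setdefaults every metric per token with a table of (metric, predicate) pairs, a per-metric first-match scan over the lowercased tokens, and a final sort of the detected metrics by column position.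
import Mathlib
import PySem

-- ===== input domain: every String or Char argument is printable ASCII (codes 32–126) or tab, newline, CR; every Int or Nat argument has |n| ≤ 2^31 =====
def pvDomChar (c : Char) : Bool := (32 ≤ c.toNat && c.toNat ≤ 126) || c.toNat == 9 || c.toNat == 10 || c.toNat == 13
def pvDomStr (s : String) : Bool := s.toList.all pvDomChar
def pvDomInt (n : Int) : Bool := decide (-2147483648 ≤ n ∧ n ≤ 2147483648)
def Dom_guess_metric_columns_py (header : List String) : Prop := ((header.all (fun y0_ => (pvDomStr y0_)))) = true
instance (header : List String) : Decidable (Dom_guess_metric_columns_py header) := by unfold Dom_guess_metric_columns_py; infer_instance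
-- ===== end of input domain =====

-- B replaces A's single pass (setdefault per metric per token) by a (metric, predicate) table,
-- a per-metric first-match scan over the lowercased tokens, and a sort of the detected metrics
-- by column position; alternative decomposition, same result (no speed claim).

-- ===== PORT A =====
def guess_metric_columns_py (header : List String) : List (String × Int) :=
  ((PySem.List.enumerate header 0).foldl (fun columns p =>
    let idx := p.1
    let token := PySem.Str.lower p.2
    let columns := if PySem.Str.isIn "dataset" token || PySem.Str.isIn "corpus" token || (token == "data" || token == "bench") then columns.setdefault "dataset_name" idx else columns
    let columns := if (token == "p" || token == "prec" || token == "precision") || PySem.Str.isIn "precision" token then columns.setdefault "precision" idx else columns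
    let columns := if (token == "r" || token == "recall") || PySem.Str.isIn "recall" token then columns.setdefault "recall" idx else columns
    let columns := if (token == "f1" || token == "f1-score" || token == "f") || PySem.Str.isIn "f1" token then columns.setdefault "f1" idx else columns
    let columns := if PySem.Str.isIn "trigger" token && PySem.Str.isIn "f1" token then columns.setdefault "trigger_f1" idx else columns
    let columns := if PySem.Str.isIn "argument" token && PySem.Str.isIn "f1" token then columns.setdefault "argument_f1" idx else columns
    columns) PySem.Dict.empty).items

-- ===== PORT B =====
def bSpecs : List (String × (String → Bool)) := [
  ("dataset_name", fun t => PySem.Str.isIn "dataset" t || PySem.Str.isIn "corpus" t || (t == "data" || t == "bench")),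
  ("precision", fun t => (t == "p" || t == "prec") || PySem.Str.isIn "precision" t),
  ("recall", fun t => t == "r" || PySem.Str.isIn "recall" t),
  ("f1", fun t => t == "f" || PySem.Str.isIn "f1" t),
  ("trigger_f1", fun t => PySem.Str.isIn "trigger" t && PySem.Str.isIn "f1" t),
  ("argument_f1", fun t => PySem.Str.isIn "argument" t && PySem.Str.isIn "f1" t)]

def firstMatchAux (pred : String → Bool) : List (Int × String) → Option Int
  | [] => none
  | (i, t) :: rest => if pred t then some i else firstMatchAux pred rest

def firstMatch (pred : String → Bool) (tokens : List String) : Option Int :=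
  firstMatchAux pred (PySem.List.enumerate tokens 0)

def guess_metric_columns_py_alt (header : List String) : List (String × Int) :=
  let tokens := header.map (fun s => PySem.Str.lower s)
  let ms := bSpecs.foldl (fun acc kp =>
    match firstMatch kp.2 tokens with
    | some i => acc ++ [(kp.1, i)]
    | none => acc) []
  let ordered := PySem.List.sorted ms (fun kv => kv.2) false
  (ordered.foldl (fun d kv => d.insert kv.1 kv.2) PySem.Dict.empty).items

-- ===== PRECONDITION & SPEC =====
def Spec_guess_metric_columns_py (header : List String) (out : List (String × Int)) : Prop := out = guess_metric_columns_py_alt header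
instance (header : List String) (out : List (String × Int)) : Decidable (Spec_guess_metric_columns_py header out) := by unfold Spec_guess_metric_columns_py; infer_instance

-- ===== CLAIM =====
def Claim_equal_guess_metric_columns_py : Prop := ∀ (header : List String), Dom_guess_metric_columns_py header → Spec_guess_metric_columns_py header (guess_metric_columns_py header)

-- ===== LEMMAS AND PROOFS =====

-- proof-side views of the two programs
def stepTok (specs : List (String × (String → Bool))) (d : PySem.Dict String Int) (i : Int) (t : String) : PySem.Dict String Int :=
  specs.foldl (fun d kp => if kp.2 t then d.setdefault kp.1 i else d) d

def afold (specs : List (String × (String → Bool))) (tokens : List String) : PySem.Dict String Int :=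
  (PySem.List.enumerate tokens 0).foldl (fun d p => stepTok specs d p.1 p.2) PySem.Dict.empty

def mtc (specs : List (String × (String → Bool))) (tokens : List String) : List (String × Int) :=
  specs.filterMap (fun kp => (firstMatch kp.2 tokens).map (fun i => (kp.1, i)))

def canonOf (ms : List (String × Int)) : List (String × Int) :=
  (PySem.List.sorted (PySem.Set.ofList (ms.map (fun ki => ki.2))) (fun x => x) false).flatMap
    (fun c => ms.filter (fun ki => ki.2 == c))

-- token-condition equivalences
lemma cond_prec (t : String) :
    ((t == "p" || t == "prec" || t == "precision") || PySem.Str.isIn "precision" t)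
      = ((t == "p" || t == "prec") || PySem.Str.isIn "precision" t) := by
  cases h : t == "precision"
  · simp
  · have : t = "precision" := by simpa using h
    subst this; decide

lemma cond_recall (t : String) :
    ((t == "r" || t == "recall") || PySem.Str.isIn "recall" t)
      = (t == "r" || PySem.Str.isIn "recall" t) := by
  cases h : t == "recall"
  · simp
  · have : t = "recall" := by simpa using h
    subst this; decide

lemma cond_f1 (t : String) :
    ((t == "f1" || t == "f1-score" || t == "f") || PySem.Str.isIn "f1" t)
      = (t == "f" || PySem.Str.isIn "f1" t) := by
  cases h1 : t == "f1"
  · cases h2 : t == "f1-score"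
    · simp
    · have : t = "f1-score" := by simpa using h2
      subst this; decide
  · have : t = "f1" := by simpa using h1
    subst this; decide

lemma enumerate_map {α β : Type} (f : α → β) (xs : List α) (s : Int) :
    PySem.List.enumerate (xs.map f) s = (PySem.List.enumerate xs s).map (fun p => (p.1, f p.2)) := by
  induction xs generalizing s with
  | nil => simp [PySem.List.enumerate_nil]
  | cons x xs ih => simp [PySem.List.enumerate_cons, ih]

set_option maxHeartbeats 1000000 in
lemma aport_eq (header : List String) :
    guess_metric_columns_py header = (afold bSpecs (header.map (fun s => PySem.Str.lower s))).items := by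
  unfold guess_metric_columns_py afold
  rw [enumerate_map, List.foldl_map]
  refine congrArg PySem.Dict.items (List.foldl_ext _ _ _ ?_)
  intro d p _
  simp only [stepTok, bSpecs, List.foldl_cons, List.foldl_nil]
  rw [cond_prec, cond_recall, cond_f1]

-- firstMatch facts
lemma firstMatchAux_append (pred : String → Bool) (l1 l2 : List (Int × String)) :
    firstMatchAux pred (l1 ++ l2) = (firstMatchAux pred l1).or (firstMatchAux pred l2) := by
  induction l1 with
  | nil => simp [firstMatchAux]
  | cons p rest ih =>
    obtain ⟨i, t⟩ := p
    by_cases h : pred t <;> simp [firstMatchAux, h, ih]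

lemma firstMatch_append_singleton (pred : String → Bool) (ts : List String) (x : String) :
    firstMatch pred (ts ++ [x])
      = (firstMatch pred ts).or (if pred x then some (ts.length : Int) else none) := by
  unfold firstMatch
  rw [PySem.List.enumerate_append, firstMatchAux_append]
  simp [PySem.List.enumerate_cons, PySem.List.enumerate_nil, firstMatchAux]

lemma firstMatchAux_mem (pred : String → Bool) (e : List (Int × String)) (i : Int)
    (h : firstMatchAux pred e = some i) : i ∈ e.map (fun p => p.1) := by
  induction e with
  | nil => simp [firstMatchAux] at h
  | cons p rest ih =>
    obtain ⟨j, t⟩ := p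
    by_cases hp : pred t
    · simp [firstMatchAux, hp] at h; simp [h]
    · simp [firstMatchAux, hp] at h
      simpa using Or.inr (ih h)

lemma firstMatch_bound (pred : String → Bool) (ts : List String) (i : Int)
    (h : firstMatch pred ts = some i) : 0 ≤ i ∧ i < (ts.length : Int) := by
  have hm := firstMatchAux_mem pred _ i h
  have : (PySem.List.enumerate ts 0).map (fun p => p.1) = PySem.List.pyRange 0 (0 + ts.length) 1 :=
    PySem.List.map_fst_enumerate ts 0
  rw [this] at hm
  have := PySem.List.mem_pyRange_one.mp hm
  omega

lemma firstMatch_nil (pred : String → Bool) : firstMatch pred [] = none := rfl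

lemma mtc_nil (specs : List (String × (String → Bool))) : mtc specs [] = [] := by
  induction specs with
  | nil => rfl
  | cons kp rest ih => simp [mtc, firstMatch_nil]

lemma mtc_snd_bound (specs : List (String × (String → Bool))) (ts : List String) (j : Int)
    (h : j ∈ (mtc specs ts).map (fun ki => ki.2)) : 0 ≤ j ∧ j < (ts.length : Int) := by
  simp only [List.mem_map] at h
  obtain ⟨ki, hki, hj⟩ := h
  simp only [mtc, List.mem_filterMap] at hki
  obtain ⟨kp, hkp, heq⟩ := hki
  cases hfm : firstMatch kp.2 ts with
  | none => rw [hfm] at heq; simp at heq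
  | some i =>
    rw [hfm] at heq
    simp only [Option.map_some, Option.some.injEq] at heq
    have hb := firstMatch_bound kp.2 ts i hfm
    subst heq
    simp only at hj
    omega

lemma mtc_keys_sublist (specs : List (String × (String → Bool))) (ts : List String) :
    ((mtc specs ts).map (fun ki => ki.1)).Sublist (specs.map (fun kp => kp.1)) := by
  induction specs with
  | nil => simp [mtc]
  | cons kp rest ih =>
    cases hfm : firstMatch kp.2 ts with
    | none =>
      have h : mtc (kp :: rest) ts = mtc rest ts := by simp [mtc, hfm]
      rw [h, List.map_cons]
      exact ih.cons _
    | some i =>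
      have h : mtc (kp :: rest) ts = (kp.1, i) :: mtc rest ts := by
        simp [mtc, hfm]
      rw [h, List.map_cons, List.map_cons]
      exact ih.cons₂ _

lemma key_unique {kp kp' : String × (String → Bool)} (specs : List (String × (String → Bool)))
    (hnd : (specs.map (fun q => q.1)).Nodup) (h1 : kp ∈ specs) (h2 : kp' ∈ specs)
    (he : kp.1 = kp'.1) : kp = kp' := by
  induction specs with
  | nil => simp at h1
  | cons q rest ih =>
    simp only [List.map_cons, List.nodup_cons] at hnd
    rcases List.mem_cons.mp h1 with rfl | h1' <;> rcases List.mem_cons.mp h2 with rfl | h2'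
    · rfl
    · exact absurd (he ▸ List.mem_map_of_mem h2') hnd.1
    · exact absurd (he ▸ List.mem_map_of_mem h1') hnd.1
    · exact ih hnd.2 h1' h2'

lemma mtc_mem_keys (specs : List (String × (String → Bool))) (ts : List String)
    (hnd : (specs.map (fun q => q.1)).Nodup) {kp : String × (String → Bool)} (hkp : kp ∈ specs) :
    (kp.1 ∈ (mtc specs ts).map (fun ki => ki.1)) ↔ (firstMatch kp.2 ts).isSome := by
  constructor
  · intro h
    simp only [List.mem_map] at h
    obtain ⟨ki, hki, hk⟩ := h
    simp only [mtc, List.mem_filterMap] at hki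
    obtain ⟨kp', hkp', heq⟩ := hki
    cases hfm : firstMatch kp'.2 ts with
    | none => rw [hfm] at heq; simp at heq
    | some i =>
      rw [hfm] at heq
      simp only [Option.map_some, Option.some.injEq] at heq
      have hkey : kp'.1 = kp.1 := by rw [← hk, ← heq]
      have hE : kp' = kp := key_unique specs hnd hkp' hkp hkey
      rw [hE] at hfm
      rw [hfm]
      rfl
  · intro h
    cases hfm : firstMatch kp.2 ts with
    | none => rw [hfm] at h; simp at h
    | some i =>
      simp only [List.mem_map]
      refine ⟨(kp.1, i), ?_, rfl⟩
      simp only [mtc, List.mem_filterMap]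
      exact ⟨kp, hkp, by rw [hfm]; rfl⟩

lemma stepTok_items (specs : List (String × (String → Bool))) (d : PySem.Dict String Int)
    (i : Int) (x : String) (hnd : (specs.map (fun q => q.1)).Nodup) :
    (stepTok specs d i x).items
      = d.items ++ (specs.filter (fun kp => kp.2 x && !(d.contains kp.1))).map (fun kp => (kp.1, i)) := by
  induction specs generalizing d with
  | nil => simp [stepTok]
  | cons kp rest ih =>
    simp only [List.map_cons, List.nodup_cons] at hnd
    rw [show stepTok (kp :: rest) d i x
        = stepTok rest (if kp.2 x then d.setdefault kp.1 i else d) i x from rfl]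
    by_cases hc : kp.2 x
    · by_cases hcon : d.contains kp.1 = true
      · rw [if_pos hc, PySem.Dict.setdefault_of_contains d i hcon, ih d hnd.2]
        have : (kp.2 x && !(d.contains kp.1)) = false := by rw [hc, hcon]; rfl
        rw [List.filter_cons, this]
        simp
      · have hcon' : d.contains kp.1 = false := by revert hcon; cases d.contains kp.1 <;> simp
        rw [if_pos hc, PySem.Dict.setdefault_of_not_contains d i hcon', ih _ hnd.2]
        rw [PySem.Dict.items_insert_of_not_contains d i hcon']
        have hf : rest.filter (fun kp' => kp'.2 x && !((d.insert kp.1 i).contains kp'.1))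
            = rest.filter (fun kp' => kp'.2 x && !(d.contains kp'.1)) := by
          apply List.filter_congr
          intro kp' hkp'
          have hne : (kp'.1 == kp.1) = false := by
            apply beq_eq_false_iff_ne.mpr
            intro he
            exact hnd.1 (he ▸ List.mem_map_of_mem hkp')
          rw [PySem.Dict.contains_insert d kp.1 kp'.1 i, hne]
          rfl
        rw [hf]
        have hhead : (kp.2 x && !(d.contains kp.1)) = true := by rw [hc, hcon']; rfl
        rw [List.filter_cons, hhead]
        simp
    · have hc' : kp.2 x = false := by revert hc; cases kp.2 x <;> simp
      rw [if_neg hc, ih d hnd.2]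
      rw [List.filter_cons, show (kp.2 x && !(d.contains kp.1)) = false by rw [hc']; rfl]
      simp

lemma mem_snd_iff_filter_ne_nil (ms : List (String × Int)) (j : Int) :
    j ∈ ms.map (fun ki => ki.2) ↔ ms.filter (fun ki => ki.2 == j) ≠ [] := by
  constructor
  · intro h hnil
    obtain ⟨ki, hki, hj⟩ := List.mem_map.mp h
    rw [List.filter_eq_nil_iff] at hnil
    exact hnil ki hki (by simp [hj])
  · intro h
    by_contra hmem
    apply h
    rw [List.filter_eq_nil_iff]
    intro ki hki hbeq
    exact hmem (List.mem_map.mpr ⟨ki, hki, by simpa using hbeq⟩)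

-- mtc over ts ++ [x]: entries at old columns are unchanged
lemma mtc_append_filter_old (specs : List (String × (String → Bool))) (ts : List String)
    (x : String) (c : Int) (hc : c ≠ (ts.length : Int)) :
    (mtc specs (ts ++ [x])).filter (fun ki => ki.2 == c)
      = (mtc specs ts).filter (fun ki => ki.2 == c) := by
  induction specs with
  | nil => simp [mtc]
  | cons kp rest ih =>
    rw [show mtc (kp :: rest) (ts ++ [x])
        = ((firstMatch kp.2 (ts ++ [x])).map (fun i => (kp.1, i))).toList ++ mtc rest (ts ++ [x]) by
      simp [mtc, List.filterMap_cons]; cases firstMatch kp.2 (ts ++ [x]) <;> simp]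
    rw [show mtc (kp :: rest) ts
        = ((firstMatch kp.2 ts).map (fun i => (kp.1, i))).toList ++ mtc rest ts by
      simp [mtc, List.filterMap_cons]; cases firstMatch kp.2 ts <;> simp]
    rw [List.filter_append, List.filter_append, ih]
    congr 1
    rw [firstMatch_append_singleton]
    cases hfm : firstMatch kp.2 ts with
    | some i => simp
    | none =>
      simp only [Option.none_or]
      by_cases hp : kp.2 x
      · rw [if_pos hp]
        simp [beq_eq_false_iff_ne.mpr (fun h => hc h.symm)]
      · rw [if_neg hp]

lemma mtc_cons_toList (kp : String × (String → Bool)) (rest : List (String × (String → Bool)))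
    (ts : List String) :
    mtc (kp :: rest) ts = ((firstMatch kp.2 ts).map (fun i => (kp.1, i))).toList ++ mtc rest ts := by
  simp only [mtc, List.filterMap_cons]
  cases firstMatch kp.2 ts <;> simp

lemma mtc_append_filter_new (specs : List (String × (String → Bool))) (ts : List String)
    (x : String) :
    (mtc specs (ts ++ [x])).filter (fun ki => ki.2 == (ts.length : Int))
      = (specs.filter (fun kp => kp.2 x && (firstMatch kp.2 ts).isNone)).map
          (fun kp => (kp.1, (ts.length : Int))) := by
  induction specs with
  | nil => simp [mtc]
  | cons kp rest ih =>
    rw [mtc_cons_toList, List.filter_append, ih, List.filter_cons, firstMatch_append_singleton]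
    cases hfm : firstMatch kp.2 ts with
    | some i =>
      have hb := firstMatch_bound kp.2 ts i hfm
      have hne : (i == (ts.length : Int)) = false := beq_eq_false_iff_ne.mpr (by omega)
      simp [hne]
    | none =>
      by_cases hp : kp.2 x
      · simp [hp]
      · simp [hp]

lemma mtc_append_eq_of_no_new (specs : List (String × (String → Bool))) (ts : List String)
    (x : String) (h : ∀ kp ∈ specs, ¬(kp.2 x = true ∧ firstMatch kp.2 ts = none)) :
    mtc specs (ts ++ [x]) = mtc specs ts := by
  unfold mtc
  apply List.filterMap_congr
  intro kp hkp
  rw [firstMatch_append_singleton]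
  cases hfm : firstMatch kp.2 ts with
  | some i => rfl
  | none =>
    have hpx : kp.2 x = false := by
      by_contra hc
      exact h kp hkp ⟨by revert hc; cases kp.2 x <;> simp, hfm⟩
    rw [Option.none_or, if_neg (by rw [hpx]; exact Bool.false_ne_true)]

lemma flatMap_filter_perm (cs : List Int) (ms : List (String × Int)) (hnd : cs.Nodup)
    (hmem : ∀ ki ∈ ms, ki.2 ∈ cs) :
    (cs.flatMap (fun c => ms.filter (fun ki => ki.2 == c))).Perm ms := by
  induction cs generalizing ms with
  | nil =>
    cases ms with
    | nil => simp
    | cons ki ms' => exact absurd (hmem ki (by simp)) (by simp)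
  | cons c cs' ih =>
    rw [List.flatMap_cons]
    simp only [List.nodup_cons] at hnd
    have hcongr : ∀ c' ∈ cs', ms.filter (fun ki => ki.2 == c')
        = (ms.filter (fun ki => !(ki.2 == c))).filter (fun ki => ki.2 == c') := by
      intro c' hc'
      rw [List.filter_filter]
      apply List.filter_congr
      intro ki _
      cases ha : ki.2 == c'
      · rfl
      · have : ki.2 = c' := by simpa using ha
        have : (ki.2 == c) = false := beq_eq_false_iff_ne.mpr (by
          rw [this]; intro he; exact hnd.1 (he ▸ hc'))
        simp [this]
    rw [List.flatMap_congr hcongr]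
    have hperm' := ih (ms.filter (fun ki => !(ki.2 == c))) hnd.2 (by
      intro ki hki
      have hm := List.mem_filter.mp hki
      have := hmem ki hm.1
      rcases List.mem_cons.mp this with he | hin
      · exfalso; have := hm.2; rw [he] at this; simp at this
      · exact hin)
    exact (List.Perm.append_left _ hperm').trans (List.filter_append_perm _ ms)

lemma canonOf_perm (ms : List (String × Int)) : (canonOf ms).Perm ms := by
  unfold canonOf
  apply flatMap_filter_perm
  · exact (PySem.List.sorted_ofList_pairwise_lt (ms.map (fun ki => ki.2))).imp ne_of_lt
  · intro ki hki
    rw [PySem.List.mem_sorted, PySem.Set.mem_ofList]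
    exact List.mem_map_of_mem hki

theorem afold_items (specs : List (String × (String → Bool)))
    (hnd : (specs.map (fun q => q.1)).Nodup) (tokens : List String) :
    (afold specs tokens).items = canonOf (mtc specs tokens) := by
  induction tokens using List.reverseRecOn with
  | nil => rw [mtc_nil]; rfl
  | append_singleton ts x ih =>
    have hstep : afold specs (ts ++ [x]) = stepTok specs (afold specs ts) (ts.length : Int) x := by
      unfold afold
      rw [PySem.List.enumerate_append, List.foldl_append]
      simp [PySem.List.enumerate_cons, PySem.List.enumerate_nil]
    rw [hstep, stepTok_items specs _ _ _ hnd, ih]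
    have hcont : ∀ kp ∈ specs, ((afold specs ts).contains kp.1) = (firstMatch kp.2 ts).isSome := by
      intro kp hkp
      have hkeys : (afold specs ts).keys = ((afold specs ts).items).map (fun ki => ki.1) := by
        simp [PySem.Dict.keys]
      have h1 : (afold specs ts).contains kp.1 = true ↔ kp.1 ∈ ((afold specs ts).items).map (fun ki => ki.1) := by
        rw [PySem.Dict.contains_iff_mem_keys, hkeys]
      have h2 : kp.1 ∈ ((afold specs ts).items).map (fun ki => ki.1) ↔ kp.1 ∈ (mtc specs ts).map (fun ki => ki.1) := by
        rw [ih]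
        exact ((canonOf_perm (mtc specs ts)).map (fun ki => ki.1)).mem_iff
      have h3 := mtc_mem_keys specs ts hnd hkp
      by_cases hs : (firstMatch kp.2 ts).isSome = true
      · rw [hs, h1.mpr (h2.mpr (h3.mpr hs))]
      · have hs' : (firstMatch kp.2 ts).isSome = false := by
          revert hs; cases (firstMatch kp.2 ts).isSome <;> simp
        rw [hs']
        cases hct : (afold specs ts).contains kp.1
        · rfl
        · exact absurd (h3.mp (h2.mp (h1.mp hct))) (by rw [hs']; exact Bool.false_ne_true)
    have hfilt : specs.filter (fun kp => kp.2 x && !((afold specs ts).contains kp.1))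
        = specs.filter (fun kp => kp.2 x && (firstMatch kp.2 ts).isNone) := by
      apply List.filter_congr
      intro kp hkp
      rw [hcont kp hkp]
      cases firstMatch kp.2 ts <;> rfl
    rw [hfilt]
    by_cases hnew : specs.filter (fun kp => kp.2 x && (firstMatch kp.2 ts).isNone) = []
    · rw [hnew, mtc_append_eq_of_no_new specs ts x (by
        intro kp hkp ⟨hpx, hfm⟩
        have := List.filter_eq_nil_iff.mp hnew kp hkp
        rw [hpx, hfm] at this
        exact this rfl)]
      simp
    · have hnmem : ∀ c ∈ (mtc specs ts).map (fun ki => ki.2), c < (ts.length : Int) := by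
        intro c hc; exact (mtc_snd_bound specs ts c hc).2
      have hcols : PySem.List.sorted (PySem.Set.ofList ((mtc specs (ts ++ [x])).map (fun ki => ki.2))) (fun x => x) false
          = (PySem.List.sorted (PySem.Set.ofList ((mtc specs ts).map (fun ki => ki.2))) (fun x => x) false) ++ [(ts.length : Int)] := by
        apply PySem.List.sorted_eq_of_perm_of_pairwise_lt
        · rw [List.perm_ext_iff_of_nodup]
          · intro a
            rw [List.mem_append, PySem.List.mem_sorted, PySem.Set.mem_ofList, PySem.Set.mem_ofList,
              List.mem_singleton]
            by_cases ha : a = (ts.length : Int)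
            · subst ha
              simp only [or_true, true_iff]
              rw [mem_snd_iff_filter_ne_nil, mtc_append_filter_new]
              intro hm
              exact hnew (List.map_eq_nil_iff.mp hm)
            · constructor
              · rintro (h | h)
                · rw [mem_snd_iff_filter_ne_nil] at h ⊢
                  rw [mtc_append_filter_old specs ts x a ha]
                  exact h
                · exact absurd h ha
              · intro h
                left
                rw [mem_snd_iff_filter_ne_nil] at h ⊢
                rw [← mtc_append_filter_old specs ts x a ha]
                exact h
          · rw [List.nodup_append]
            refine ⟨(PySem.List.sorted_ofList_pairwise_lt _).imp ne_of_lt, List.nodup_singleton _, ?_⟩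
            intro a hc b hb
            rw [List.mem_singleton] at hb
            subst hb
            have : a ∈ (mtc specs ts).map (fun ki => ki.2) := by
              rw [← PySem.Set.mem_ofList, ← PySem.List.mem_sorted (key := fun x => x) (rev := false)]
              exact hc
            exact ne_of_lt (hnmem a this)
          · exact PySem.Set.nodup_ofList _
        · rw [List.pairwise_append]
          refine ⟨PySem.List.sorted_ofList_pairwise_lt _, List.pairwise_singleton _ _, ?_⟩
          intro a hc b hb
          rw [List.mem_singleton] at hb
          subst hb
          have : a ∈ (mtc specs ts).map (fun ki => ki.2) := by
            rw [← PySem.Set.mem_ofList, ← PySem.List.mem_sorted (key := fun x => x) (rev := false)]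
            exact hc
          exact hnmem a this
      unfold canonOf
      rw [hcols, List.flatMap_append]
      congr 1
      · apply List.flatMap_congr
        intro c hc
        have : c ∈ (mtc specs ts).map (fun ki => ki.2) := by
          rw [← PySem.Set.mem_ofList, ← PySem.List.mem_sorted (key := fun x => x) (rev := false)]
          exact hc
        exact (mtc_append_filter_old specs ts x c (ne_of_lt (hnmem c this))).symm
      · rw [List.flatMap_cons, List.flatMap_nil, List.append_nil, mtc_append_filter_new]

lemma bms_eq (specs : List (String × (String → Bool))) (tokens : List String)
    (acc : List (String × Int)) :
    specs.foldl (fun acc kp =>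
      match firstMatch kp.2 tokens with
      | some i => acc ++ [(kp.1, i)]
      | none => acc) acc = acc ++ mtc specs tokens := by
  induction specs generalizing acc with
  | nil => simp [mtc]
  | cons kp rest ih =>
    rw [List.foldl_cons, ih, mtc_cons_toList]
    cases hfm : firstMatch kp.2 tokens with
    | some i => simp
    | none => simp

-- ===== stable sort by column = grouping by ascending column =====

lemma insertBy_append_not_before {α : Type} (bf : α → α → Bool) (x : α) (l1 l2 : List α)
    (h : ∀ y ∈ l1, bf x y = false) :
    PySem.List.insertBy bf x (l1 ++ l2) = l1 ++ PySem.List.insertBy bf x l2 := by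
  induction l1 with
  | nil => rfl
  | cons y ys ih =>
    rw [List.cons_append, show PySem.List.insertBy bf x (y :: (ys ++ l2))
        = if bf x y then x :: y :: (ys ++ l2) else y :: PySem.List.insertBy bf x (ys ++ l2) from rfl]
    rw [h y (by simp), if_neg Bool.false_ne_true, ih (fun y hy => h y (by simp [hy]))]
    rfl

lemma insertBy_all_before {α : Type} (bf : α → α → Bool) (x : α) (l : List α)
    (h : ∀ y ∈ l, bf x y = true) :
    PySem.List.insertBy bf x l = x :: l := by
  cases l with
  | nil => rfl
  | cons y ys =>
    rw [show PySem.List.insertBy bf x (y :: ys)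
        = if bf x y then x :: y :: ys else y :: PySem.List.insertBy bf x ys from rfl]
    rw [h y (by simp), if_pos rfl]

def insertCol (c : Int) : List Int → List Int
  | [] => [c]
  | d :: ds => if c < d then c :: d :: ds else if c = d then d :: ds else d :: insertCol c ds

lemma mem_insertCol (c a : Int) (cols : List Int) :
    a ∈ insertCol c cols ↔ a = c ∨ a ∈ cols := by
  induction cols with
  | nil => simp [insertCol]
  | cons d ds ih =>
    simp only [insertCol]
    split_ifs with h1 h2
    · simp
    · subst h2; simp
    · simp [ih]
      tauto

lemma pairwise_insertCol (c : Int) (cols : List Int) (hp : cols.Pairwise (· < ·)) :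
    (insertCol c cols).Pairwise (· < ·) := by
  induction cols with
  | nil => simp [insertCol]
  | cons d ds ih =>
    rw [List.pairwise_cons] at hp
    simp only [insertCol]
    split_ifs with h1 h2
    · rw [List.pairwise_cons]
      refine ⟨?_, List.pairwise_cons.mpr hp⟩
      intro a ha
      rcases List.mem_cons.mp ha with rfl | ha'
      · exact h1
      · exact lt_trans h1 (hp.1 a ha')
    · exact List.pairwise_cons.mpr hp
    · rw [List.pairwise_cons]
      refine ⟨?_, ih hp.2⟩
      intro a ha
      rcases (mem_insertCol c a ds).mp ha with rfl | ha'
      · omega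
      · exact hp.1 a ha'

lemma key_mem_flatMap {α : Type} (key : α → Int) (cols : List Int) (g : Int → List α)
    (hkey : ∀ c, ∀ y ∈ g c, key y = c) (y : α) (hy : y ∈ cols.flatMap g) : key y ∈ cols := by
  obtain ⟨c, hc, hyc⟩ := List.mem_flatMap.mp hy
  rw [hkey c y hyc]
  exact hc

lemma insertBy_flatMap_groups {α : Type} (key : α → Int) (x : α) (cols : List Int)
    (g : Int → List α)
    (hp : cols.Pairwise (· < ·))
    (hkey : ∀ c, ∀ y ∈ g c, key y = c)
    (hne : ∀ c ∈ cols, g c ≠ [])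
    (hgc : key x ∉ cols → g (key x) = []) :
    PySem.List.insertBy (fun a b => decide (key a < key b)) x (cols.flatMap g)
      = (insertCol (key x) cols).flatMap (fun c => g c ++ if c == key x then [x] else []) := by
  induction cols with
  | nil =>
    have : g (key x) = [] := hgc (by simp)
    simp [insertCol, this, PySem.List.insertBy]
  | cons d ds ih =>
    rw [List.pairwise_cons] at hp
    rcases lt_trichotomy (key x) d with hlt | heq | hgt
    · -- key x < d: x goes in front of everything
      have hxnot : key x ∉ d :: ds := by
        intro hm
        rcases List.mem_cons.mp hm with rfl | hm'
        · omega
        · exact absurd (hp.1 _ hm') (by omega)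
      have hall : ∀ y ∈ (d :: ds).flatMap g, (decide (key x < key y)) = true := by
        intro y hy
        have := key_mem_flatMap key (d :: ds) g hkey y hy
        rcases List.mem_cons.mp this with he | hm'
        · simp [he, hlt]
        · have := hp.1 _ hm'; simp; omega
      rw [insertBy_all_before _ _ _ hall,
        show insertCol (key x) (d :: ds) = key x :: d :: ds by
          simp only [insertCol]; rw [if_pos hlt]]
      simp only [List.flatMap_cons]
      rw [hgc hxnot]
      have hrest : ds.flatMap (fun c => g c ++ if c == key x then [x] else [])
          = ds.flatMap g := by
        apply List.flatMap_congr
        intro c hc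
        have := hp.1 _ hc
        have : (c == key x) = false := beq_eq_false_iff_ne.mpr (by omega)
        rw [this]; simp
      have hd : (d == key x) = false := beq_eq_false_iff_ne.mpr (by omega)
      rw [hrest, hd]
      simp
    · -- key x = d: x goes right after group d
      have hskip : ∀ y ∈ g d, (decide (key x < key y)) = false := by
        intro y hy
        rw [hkey d y hy]
        simp; omega
      have hall : ∀ y ∈ ds.flatMap g, (decide (key x < key y)) = true := by
        intro y hy
        have hm := key_mem_flatMap key ds g hkey y hy
        have := hp.1 _ hm
        simp; omega
      rw [List.flatMap_cons, insertBy_append_not_before _ _ _ _ hskip,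
        insertBy_all_before _ _ _ hall,
        show insertCol (key x) (d :: ds) = d :: ds by
          simp only [insertCol]; rw [if_neg (by omega), if_pos heq]]
      simp only [List.flatMap_cons]
      have hrest : ds.flatMap (fun c => g c ++ if c == key x then [x] else [])
          = ds.flatMap g := by
        apply List.flatMap_congr
        intro c hc
        have := hp.1 _ hc
        have : (c == key x) = false := beq_eq_false_iff_ne.mpr (by omega)
        rw [this]; simp
      have hd : (d == key x) = true := by simp [heq]
      rw [hrest, hd]
      simp
    · -- d < key x: skip group d, recurse
      have hskip : ∀ y ∈ g d, (decide (key x < key y)) = false := by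
        intro y hy
        rw [hkey d y hy]
        simp; omega
      rw [List.flatMap_cons, insertBy_append_not_before _ _ _ _ hskip]
      rw [ih hp.2 (fun c hc => hne c (by simp [hc]))
        (fun hm => hgc (by
          intro hmm
          rcases List.mem_cons.mp hmm with he | hm'
          · omega
          · exact hm hm'))]
      rw [show insertCol (key x) (d :: ds) = d :: insertCol (key x) ds by
        simp only [insertCol]; rw [if_neg (by omega), if_neg (by omega)]]
      simp only [List.flatMap_cons]
      have hd : (d == key x) = false := beq_eq_false_iff_ne.mpr (by omega)
      rw [hd]
      simp

lemma sorted_snd_eq_canonOf (ms : List (String × Int)) :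
    PySem.List.sorted ms (fun kv => kv.2) false = canonOf ms := by
  induction ms using List.reverseRecOn with
  | nil => rfl
  | append_singleton ms x ih =>
    rw [PySem.List.sorted_eq_foldl_insertBy, List.foldl_append, List.foldl_cons, List.foldl_nil,
      ← PySem.List.sorted_eq_foldl_insertBy, ih]
    unfold canonOf
    rw [insertBy_flatMap_groups (fun kv : String × Int => kv.2) x _ _
      ((PySem.List.sorted_ofList_pairwise_lt (ms.map (fun ki => ki.2))))
      (fun c y hy => by simpa using (List.mem_filter.mp hy).2)
      (fun c hc => by
        rw [← mem_snd_iff_filter_ne_nil]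
        rw [PySem.List.mem_sorted, PySem.Set.mem_ofList] at hc
        exact hc)
      (fun hm => by
        rw [PySem.List.mem_sorted, PySem.Set.mem_ofList] at hm
        by_contra hne'
        exact hm ((mem_snd_iff_filter_ne_nil ms x.2).mpr hne'))]
    have hcols : PySem.List.sorted (PySem.Set.ofList ((ms ++ [x]).map (fun ki => ki.2))) (fun c => c) false
        = insertCol x.2 (PySem.List.sorted (PySem.Set.ofList (ms.map (fun ki => ki.2))) (fun c => c) false) := by
      apply PySem.List.sorted_eq_of_perm_of_pairwise_lt
      · rw [List.perm_ext_iff_of_nodup]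
        · intro a
          rw [mem_insertCol, PySem.Set.mem_ofList, PySem.List.mem_sorted, PySem.Set.mem_ofList]
          simp [or_comm]
        · exact (pairwise_insertCol _ _ (PySem.List.sorted_ofList_pairwise_lt _)).imp ne_of_lt
        · exact PySem.Set.nodup_ofList _
      · exact pairwise_insertCol _ _ (PySem.List.sorted_ofList_pairwise_lt _)
    rw [hcols]
    apply List.flatMap_congr
    intro c hc
    rw [List.filter_append]
    congr 1
    simp only [List.filter_cons, List.filter_nil]
    by_cases h : c = x.2
    · subst h; simp
    · have h1 : (x.2 == c) = false := beq_eq_false_iff_ne.mpr (fun he => h he.symm)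
      have h2 : (c == x.2) = false := beq_eq_false_iff_ne.mpr h
      rw [h1, h2]

lemma bport_eq (header : List String) :
    guess_metric_columns_py_alt header
      = PySem.List.sorted (mtc bSpecs (header.map (fun s => PySem.Str.lower s))) (fun kv => kv.2) false := by
  simp only [guess_metric_columns_py_alt]
  rw [bms_eq, List.nil_append]
  rw [show (fun (d : PySem.Dict String Int) (kv : String × Int) => d.insert kv.1 kv.2)
      = (fun (d : PySem.Dict String Int) (a : String × Int) =>
          d.insert ((fun kv : String × Int => kv.1) a) ((fun kv : String × Int => kv.2) a)) from rfl]
  rw [PySem.Dict.items_foldl_insert_fresh _ _ _ _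
    (by intro a _; exact PySem.Dict.contains_empty _)
    (by
      rw [((PySem.List.sorted_perm _ _ (rev := false)).map (fun kv : String × Int => kv.1)).nodup_iff]
      exact (mtc_keys_sublist bSpecs _).nodup (by decide))]
  simp [show PySem.Dict.empty.items = ([] : List (String × Int)) from rfl]

-- ===== VERDICT =====
theorem guess_metric_columns_py_spec : Claim_equal_guess_metric_columns_py := by
  intro header _
  unfold Spec_guess_metric_columns_py
  rw [aport_eq, bport_eq, afold_items bSpecs (by decide), sorted_snd_eq_canonOf]
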